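-- pv_equiv track=rewrite | github.com/wu-uk/AutoYara | src/autoyara/collectors/analysis.py | _find_seq_in_lines
-- ===== SOURCE A (Python) =====
-- def _lines_equal_seq(chunk, new_seq):
--     if len(chunk) != len(new_seq):
--         return False
--     for a, b in zip(chunk, new_seq, strict=False):
--         if a.rstrip("\r") != b.rstrip("\r"):
--             return False
--     return True
--
-- def _find_seq_in_lines(lines: list[str], seq: list[str], near: int) -> int | None:
--     """在 lines 中以 near 为中心，搜索与 seq 完全匹配的起始行索引（允许 ±50 行偏移）。"""
--     if not seq:
--         return None
--     radius = 50
--     lo = max(0, near - radius)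
--     hi = min(len(lines) - len(seq), near + radius)
--     best_idx: int | None = None
--     best_dist = radius + 1
--     for i in range(lo, hi + 1):
--         chunk = lines[i : i + len(seq)]
--         if _lines_equal_seq(chunk, seq) or _lines_equal_seq(
--             [x.rstrip() for x in chunk], [x.rstrip() for x in seq]
--         ):
--             d = abs(i - near)
--             if d < best_dist:
--                 best_dist = d
--                 best_idx = i
--     return best_idx
-- ===== SOURCE B (Python) =====
-- def _lines_equal_seq(chunk, new_seq):
--     if len(chunk) != len(new_seq):
--         return False
--     for a, b in zip(chunk, new_seq, strict=False):
--         if a.rstrip("\r") != b.rstrip("\r"):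
--             return False
--     return True
--
-- def _find_seq_in_lines(lines: list[str], seq: list[str], near: int) -> int | None:
--     """Expanding ring search: try distances 0..50 outward from `near`,
--     lower index first at equal distance, return the first matching start."""
--     if not seq:
--         return None
--     radius = 50
--     lo = max(0, near - radius)
--     hi = min(len(lines) - len(seq), near + radius)
--
--     def matches(i):
--         chunk = lines[i : i + len(seq)]
--         return _lines_equal_seq(chunk, seq) or _lines_equal_seq(
--             [x.rstrip() for x in chunk], [x.rstrip() for x in seq]
--         )
--
--     for d in range(radius + 1):
--         i = near - d
--         if lo <= i <= hi and matches(i):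
--             return i
--         j = near + d
--         if d > 0 and lo <= j <= hi and matches(j):
--             return j
--     return None
-- ===== Notes on version B (the rewrite author's own statement) =====
-- stated objective: alternative
-- what changed: Replaces the full left-to-right scan of [lo,hi] that tracks a best (distance, index) pair with an expanding ring search over distances d = 0..50 from `near` (lower index first at equal distance) that returns the first match, so no best-so-far state is kept and the scan stops at the nearest match.
import Mathlib
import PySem

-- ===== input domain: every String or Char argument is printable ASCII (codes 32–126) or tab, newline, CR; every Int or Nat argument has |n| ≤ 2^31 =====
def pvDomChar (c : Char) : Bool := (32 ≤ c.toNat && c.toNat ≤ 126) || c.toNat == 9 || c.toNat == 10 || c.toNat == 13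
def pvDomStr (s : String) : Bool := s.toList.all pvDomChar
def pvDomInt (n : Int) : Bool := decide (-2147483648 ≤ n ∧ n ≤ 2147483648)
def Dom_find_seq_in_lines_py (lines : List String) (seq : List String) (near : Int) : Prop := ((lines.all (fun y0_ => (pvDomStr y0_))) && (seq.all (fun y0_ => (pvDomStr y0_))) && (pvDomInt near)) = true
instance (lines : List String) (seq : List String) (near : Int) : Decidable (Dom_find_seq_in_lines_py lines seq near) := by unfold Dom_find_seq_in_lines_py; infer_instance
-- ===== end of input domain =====

-- B replaces A's full left-to-right window scan with best-(distance,index) state by an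
-- expanding ring search over distances 0..50 from `near` that returns the first match.


-- ===== PORT A =====
-- s.rstrip("\r") ported by hand (PySem has no one-sided strip with a char set):
-- drop trailing '\r' characters; exact for any string.
def rstripCR_A (s : String) : String :=
  String.ofList ((s.toList.reverse.dropWhile (fun c => c == '\r')).reverse)

def lines_equal_seq_A (chunk new_seq : List String) : Bool :=
  if chunk.length ≠ new_seq.length then false
  else (chunk.zip new_seq).all (fun p => rstripCR_A p.1 == rstripCR_A p.2)

-- the for-loop of A as structural recursion over the remaining iteration count;
-- state = (best_idx, best_dist), i the current index
def findA_loop (lines seq : List String) (near : Int) (i : Int)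
    (best_idx : Option Int) (best_dist : Int) : Nat → Option Int
  | 0 => best_idx
  | fuel + 1 =>
    let chunk := PySem.List.slice lines (some i) (some (i + (seq.length : Int)))
    if lines_equal_seq_A chunk seq
        || lines_equal_seq_A (chunk.map PySem.Str.rstrip) (seq.map PySem.Str.rstrip) then
      let d := |i - near|
      if d < best_dist then findA_loop lines seq near (i + 1) (some i) d fuel
      else findA_loop lines seq near (i + 1) best_idx best_dist fuel
    else findA_loop lines seq near (i + 1) best_idx best_dist fuel

def find_seq_in_lines_py (lines : List String) (seq : List String) (near : Int) : Option Int :=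
  if seq.isEmpty then none
  else
    let radius : Int := 50
    let lo := max 0 (near - radius)
    let hi := min ((lines.length : Int) - (seq.length : Int)) (near + radius)
    findA_loop lines seq near lo none (radius + 1) (hi + 1 - lo).toNat

-- ===== PORT B =====
def rstripCR_B (s : String) : String :=
  String.ofList ((s.toList.reverse.dropWhile (fun c => c == '\r')).reverse)

def lines_equal_seq_B (chunk new_seq : List String) : Bool :=
  if chunk.length ≠ new_seq.length then false
  else (chunk.zip new_seq).all (fun p => rstripCR_B p.1 == rstripCR_B p.2)

def matches_B (lines seq : List String) (i : Int) : Bool :=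
  let chunk := PySem.List.slice lines (some i) (some (i + (seq.length : Int)))
  lines_equal_seq_B chunk seq
    || lines_equal_seq_B (chunk.map PySem.Str.rstrip) (seq.map PySem.Str.rstrip)

-- the for-loop of B: distance d grows outward; fuel = remaining distances
def findB_loop (lines seq : List String) (near lo hi : Int) (d : Int) : Nat → Option Int
  | 0 => none
  | fuel + 1 =>
    if lo ≤ near - d ∧ near - d ≤ hi ∧ matches_B lines seq (near - d) = true then
      some (near - d)
    else if 0 < d ∧ lo ≤ near + d ∧ near + d ≤ hi ∧ matches_B lines seq (near + d) = true then
      some (near + d)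
    else findB_loop lines seq near lo hi (d + 1) fuel

def find_seq_in_lines_py_alt (lines : List String) (seq : List String) (near : Int) : Option Int :=
  if seq.isEmpty then none
  else
    let radius : Int := 50
    let lo := max 0 (near - radius)
    let hi := min ((lines.length : Int) - (seq.length : Int)) (near + radius)
    findB_loop lines seq near lo hi 0 (radius + 1).toNat

-- ===== PRECONDITION & SPEC =====
def Spec_find_seq_in_lines_py (lines : List String) (seq : List String) (near : Int) (out : Option Int) : Prop := out = find_seq_in_lines_py_alt lines seq near
instance (lines : List String) (seq : List String) (near : Int) (out : Option Int) : Decidable (Spec_find_seq_in_lines_py lines seq near out) := by unfold Spec_find_seq_in_lines_py; infer_instance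

-- ===== CLAIM (what is proved, stated in full; the proofs are below) =====
def Claim_equal_find_seq_in_lines_py : Prop := ∀ (lines : List String) (seq : List String) (near : Int), Dom_find_seq_in_lines_py lines seq near → Spec_find_seq_in_lines_py lines seq near (find_seq_in_lines_py lines seq near)

-- ===== LEMMAS AND PROOFS =====

-- "r is the nearest matching start in [lo,hi], ties to the lower index" (none = no match)
def GoodResult (M : Int → Bool) (lo hi near : Int) : Option Int → Prop
  | none => ∀ j, lo ≤ j → j ≤ hi → M j = false
  | some i => lo ≤ i ∧ i ≤ hi ∧ M i = true ∧
      ∀ j, lo ≤ j → j ≤ hi → M j = true →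
        (|i - near| < |j - near| ∨ (|i - near| = |j - near| ∧ i ≤ j))

theorem GoodResult_unique (M : Int → Bool) (lo hi near : Int) (r r' : Option Int)
    (h : GoodResult M lo hi near r) (h' : GoodResult M lo hi near r') : r = r' := by
  match r, r' with
  | none, none => rfl
  | none, some i' =>
    exact absurd h'.2.2.1 (by simp [h i' h'.1 h'.2.1])
  | some i, none =>
    exact absurd h.2.2.1 (by simp [h' i h.1 h.2.1])
  | some i, some i' =>
    obtain ⟨hl, hr, hm, hb⟩ := h
    obtain ⟨hl', hr', hm', hb'⟩ := h'
    have t1 := hb i' hl' hr' hm'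
    have t2 := hb' i hl hr hm
    have : i = i' := by simp only [Int.abs_eq_natAbs] at *; omega
    simp [this]

theorem lines_equal_seq_AB : lines_equal_seq_A = lines_equal_seq_B := by
  funext a b
  simp [lines_equal_seq_A, lines_equal_seq_B, rstripCR_A, rstripCR_B]

theorem findA_loop_good (lines seq : List String) (near lo hi : Int)
    (Hlo : near - 50 ≤ lo) (Hhi : hi ≤ near + 50) :
    ∀ (fuel : Nat) (i : Int) (bi : Option Int) (bd : Int),
      lo ≤ i → (fuel : Int) = max 0 (hi + 1 - i) →
      (bi = none → bd = 51 ∧ ∀ j, lo ≤ j → j < i → matches_B lines seq j = false) →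
      (∀ x, bi = some x → bd = |x - near| ∧ lo ≤ x ∧ x < i ∧ x ≤ hi ∧
          matches_B lines seq x = true ∧
          ∀ j, lo ≤ j → j < i → matches_B lines seq j = true →
            (bd < |j - near| ∨ (bd = |j - near| ∧ x ≤ j))) →
      GoodResult (matches_B lines seq) lo hi near (findA_loop lines seq near i bi bd fuel) := by
  intro fuel
  induction fuel with
  | zero =>
    intro i bi bd hloi hf hN hS
    have hi1 : hi + 1 ≤ i := by omega
    match bi with
    | none =>
      obtain ⟨_, hjs⟩ := hN rfl
      exact fun j h1 h2 => hjs j h1 (by omega)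
    | some x =>
      obtain ⟨hbd, hlx, hxi, hxhi, hmx, hmin⟩ := hS x rfl
      exact ⟨hlx, hxhi, hmx, fun j h1 h2 h3 => by
        have := hmin j h1 (by omega) h3
        simp only [Int.abs_eq_natAbs] at *; omega⟩
  | succ fuel ih =>
    intro i bi bd hloi hf hN hS
    have hile : i ≤ hi := by omega
    show GoodResult _ _ _ _ (findA_loop lines seq near i bi bd (fuel + 1))
    rw [findA_loop]
    have hcond : (lines_equal_seq_A (PySem.List.slice lines (some i) (some (i + (seq.length : Int)))) seq
        || lines_equal_seq_A ((PySem.List.slice lines (some i) (some (i + (seq.length : Int)))).map PySem.Str.rstrip) (seq.map PySem.Str.rstrip))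
        = matches_B lines seq i := by
      rw [lines_equal_seq_AB]; rfl
    simp only [hcond]
    by_cases hm : matches_B lines seq i = true
    · simp only [hm, if_pos]
      have hdle : |i - near| ≤ 50 := by simp only [Int.abs_eq_natAbs]; omega
      by_cases hd : |i - near| < bd
      · simp only [hd, if_pos]
        apply ih (i + 1) (some i) |i - near| (by omega) (by omega)
        · intro h; cases h
        · intro x hx
          cases hx
          refine ⟨rfl, hloi, by omega, hile, hm, ?_⟩
          intro j h1 h2 h3
          by_cases hji : j = i
          · subst hji; exact Or.inr ⟨rfl, le_refl _⟩
          · match bi with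
            | none =>
              have := (hN rfl).2 j h1 (by omega)
              simp [this] at h3
            | some x =>
              have := (hS x rfl).2.2.2.2.2 j h1 (by omega) h3
              have hbd := (hS x rfl).1
              simp only [Int.abs_eq_natAbs] at *; omega
      · simp only [hd, if_false]
        match bi with
        | none =>
          exfalso
          have := (hN rfl).1
          omega
        | some x =>
          obtain ⟨hbd, hlx, hxi, hxhi, hmx, hmin⟩ := hS x rfl
          apply ih (i + 1) (some x) bd (by omega) (by omega)
          · intro h; cases h
          · intro y hy
            cases hy
            refine ⟨hbd, hlx, by omega, hxhi, hmx, ?_⟩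
            intro j h1 h2 h3
            by_cases hji : j = i
            · subst hji; simp only [Int.abs_eq_natAbs] at *; omega
            · exact hmin j h1 (by omega) h3
    · simp only [hm, Bool.false_eq_true, if_false]
      apply ih (i + 1) bi bd (by omega) (by omega)
      · intro h
        obtain ⟨h51, hjs⟩ := hN h
        refine ⟨h51, fun j h1 h2 => ?_⟩
        by_cases hji : j = i
        · subst hji; simpa using hm
        · exact hjs j h1 (by omega)
      · intro x hx
        obtain ⟨hbd, hlx, hxi, hxhi, hmx, hmin⟩ := hS x hx
        refine ⟨hbd, hlx, by omega, hxhi, hmx, ?_⟩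
        intro j h1 h2 h3
        by_cases hji : j = i
        · subst hji; simp [h3] at hm
        · exact hmin j h1 (by omega) h3

theorem findB_loop_good (lines seq : List String) (near lo hi : Int)
    (Hlo : near - 50 ≤ lo) (Hhi : hi ≤ near + 50) :
    ∀ (fuel : Nat) (d : Int), 0 ≤ d → (fuel : Int) = 51 - d →
      (∀ j, lo ≤ j → j ≤ hi → matches_B lines seq j = true → d ≤ |j - near|) →
      GoodResult (matches_B lines seq) lo hi near (findB_loop lines seq near lo hi d fuel) := by
  intro fuel
  induction fuel with
  | zero =>
    intro d hd0 hf hinv j h1 h2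
    by_contra hc
    have := hinv j h1 h2 (by revert hc; cases matches_B lines seq j <;> simp)
    simp only [Int.abs_eq_natAbs] at *; omega
  | succ fuel ih =>
    intro d hd0 hf hinv
    rw [findB_loop]
    split_ifs with c1 c2
    · obtain ⟨b1, b2, bm⟩ := c1
      refine ⟨b1, b2, bm, ?_⟩
      intro j h1 h2 h3
      have hdj := hinv j h1 h2 h3
      have : |near - d - near| = d := by simp only [Int.abs_eq_natAbs]; omega
      simp only [Int.abs_eq_natAbs] at *; omega
    · obtain ⟨hdpos, b1, b2, bm⟩ := c2
      refine ⟨b1, b2, bm, ?_⟩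
      intro j h1 h2 h3
      have hdj := hinv j h1 h2 h3
      have : |near + d - near| = d := by simp only [Int.abs_eq_natAbs]; omega
      by_cases heq : |j - near| = d
      · have : j = near - d ∨ j = near + d := by simp only [Int.abs_eq_natAbs] at *; omega
        rcases this with hj | hj
        · exfalso; exact c1 ⟨by omega, by omega, by rw [← hj]; exact h3⟩
        · simp only [Int.abs_eq_natAbs] at *; omega
      · simp only [Int.abs_eq_natAbs] at *; omega
    · apply ih (d + 1) (by omega) (by omega)
      intro j h1 h2 h3
      have hdj := hinv j h1 h2 h3
      by_cases heq : |j - near| = d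
      · exfalso
        have : j = near - d ∨ j = near + d := by simp only [Int.abs_eq_natAbs] at *; omega
        rcases this with hj | hj
        · exact c1 ⟨by omega, by omega, by rw [← hj]; exact h3⟩
        · by_cases hdz : d = 0
          · exact c1 ⟨by omega, by omega, by rw [show near - d = j by omega]; exact h3⟩
          · exact c2 ⟨by omega, by omega, by omega, by rw [← hj]; exact h3⟩
      · simp only [Int.abs_eq_natAbs] at *; omega

-- ===== VERDICT (by name: the statement is the Claim_ definition above) =====
theorem find_seq_in_lines_py_spec : Claim_equal_find_seq_in_lines_py := by
  intro lines seq near _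
  show find_seq_in_lines_py lines seq near = find_seq_in_lines_py_alt lines seq near
  unfold find_seq_in_lines_py find_seq_in_lines_py_alt
  by_cases hseq : seq.isEmpty
  · simp [hseq]
  · simp only [hseq, if_false, Bool.false_eq_true]
    set lo := max 0 (near - 50) with hlo
    set hi := min ((lines.length : Int) - (seq.length : Int)) (near + 50) with hhi
    have Hlo : near - 50 ≤ lo := by omega
    have Hhi : hi ≤ near + 50 := by omega
    apply GoodResult_unique (matches_B lines seq) lo hi near
    · exact findA_loop_good lines seq near lo hi Hlo Hhi _ lo none 51 (by omega)
        (by omega) (fun _ => ⟨rfl, fun j h1 h2 => absurd h1 (by omega)⟩)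
        (fun x hx => by cases hx)
    · exact findB_loop_good lines seq near lo hi Hlo Hhi _ 0 (by omega) (by omega)
        (fun j _ _ _ => abs_nonneg _)
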